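-- pv_equiv track=rewrite | github.com/Mudkip/AdventOfCode | 2023/day16/16.py | solve
-- ===== SOURCE A (Python) =====
-- from enum import Enum
--
-- class Direction(Enum):
--     UP = (-1, 0)
--     DOWN = (1, 0)
--     LEFT = (0, -1)
--     RIGHT = (0, 1)
--
-- def parse_input(input):
--     return [list(x) for x in input.splitlines()]
--
-- def navigate(grid, start, direction, visited = set()):
--     y, x = start
--
--     if ((y, x), direction) in visited or x < 0 or y < 0 or x >= len(grid[0]) or y >= len(grid):
--         return visited
--
--     visited.add(((y, x), direction))
--     char = grid[y][x]
--     match char: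
--         case "|":
--             match direction:
--                 case Direction.LEFT | Direction.RIGHT:
--                     new_up_coords = (y + Direction.UP.value[0], x + Direction.UP.value[1])
--                     new_down_coords = (y + Direction.DOWN.value[0], x + Direction.DOWN.value[1])
--                     return (navigate(grid, new_up_coords, Direction.UP, visited) | navigate(grid, new_down_coords, Direction.DOWN, visited))
--         case "-":
--             match direction:
--                 case Direction.UP | Direction.DOWN:
--                     new_left_coords = (y + Direction.LEFT.value[0], x + Direction.LEFT.value[1])
--                     new_right_coords = (y + Direction.RIGHT.value[0], x + Direction.RIGHT.value[1])
--                     return (navigate(grid, new_left_coords, Direction.LEFT, visited) | navigate(grid, new_right_coords, Direction.RIGHT, visited))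
--         case "\\":
--             match direction:
--                 case Direction.UP:
--                     direction = Direction.LEFT
--                 case Direction.DOWN:
--                     direction = Direction.RIGHT
--                 case Direction.LEFT:
--                     direction = Direction.UP
--                 case Direction.RIGHT:
--                     direction = Direction.DOWN
--         case "/":
--             match direction:
--                 case Direction.UP:
--                     direction = Direction.RIGHT
--                 case Direction.DOWN:
--                     direction = Direction.LEFT
--                 case Direction.LEFT:
--                     direction = Direction.DOWN
--                 case Direction.RIGHT:
--                     direction = Direction.UP
--
--     new_coords = (y + direction.value[0], x + direction.value[1])
--     return navigate(grid, new_coords, direction, visited)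
--
-- def count_energized(visited):
--     return len(set(x[0] for x in visited))
--
-- def solve(input):
--     grid = parse_input(input)
--     part_1 = count_energized(navigate(grid, (0, 0), Direction.RIGHT, set()))
--
--     max_energized = 0
--     for x in range(len(grid[0])):
--         max_energized = max(max_energized, count_energized(navigate(grid, (0, x), Direction.DOWN, set())))
--         max_energized = max(max_energized, count_energized(navigate(grid, (len(grid) - 1, x), Direction.UP, set())))
--     for y in range(len(grid)):
--         max_energized = max(max_energized, count_energized(navigate(grid, (y, 0), Direction.RIGHT, set())))
--         max_energized = max(max_energized, count_energized(navigate(grid, (y, len(grid[0]) - 1), Direction.LEFT, set())))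
--     part_2 = max_energized
--
--     return part_1, part_2
-- ===== SOURCE B (Python) =====
-- def solve(input):
--     grid = input.splitlines()
--     rows, cols = len(grid), len(grid[0])
--     DELTAS = [(-1, 0), (1, 0), (0, -1), (0, 1)]  # codes: 0=up 1=down 2=left 3=right
--
--     def step(c, d):
--         if c == "|" and d >= 2:
--             return [0, 1]
--         if c == "-" and d < 2:
--             return [2, 3]
--         if c == "\\":
--             return [[2, 3, 0, 1][d]]
--         if c == "/":
--             return [[3, 2, 1, 0][d]]
--         return [d]
--
--     def energized(y, x, d):
--         seen = set()
--         todo = [((y, x), d)]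
--         while todo:
--             (y, x), d = todo.pop()
--             if ((y, x), d) in seen or not (0 <= y < rows and 0 <= x < cols):
--                 continue
--             seen.add(((y, x), d))
--             for nd in reversed(step(grid[y][x], d)):
--                 dy, dx = DELTAS[nd]
--                 todo.append(((y + dy, x + dx), nd))
--         return len({p for p, _ in seen})
--
--     counts = [energized(0, x, 1) for x in range(cols)]
--     counts += [energized(rows - 1, x, 0) for x in range(cols)]
--     counts += [energized(y, 0, 3) for y in range(rows)]
--     counts += [energized(y, cols - 1, 2) for y in range(rows)]
--     return energized(0, 0, 3), max(counts)
-- ===== Notes on version B (the rewrite author's own statement) =====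
-- stated objective: faster
-- what changed: Replaces A's recursive navigate (Direction enum pairs, threaded mutable visited set, set-union returns at splitters) by a worklist loop over integer direction codes 0..3 with delta/reflection lookup tables, indexing the raw splitlines strings directly, and collecting the per-edge-start counts into one list whose max() is part 2.
-- outside the precondition, e.g. on solve('/a/\n\\.|b'): A returns (1, 6), B returns (1, 6)
import Mathlib
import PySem

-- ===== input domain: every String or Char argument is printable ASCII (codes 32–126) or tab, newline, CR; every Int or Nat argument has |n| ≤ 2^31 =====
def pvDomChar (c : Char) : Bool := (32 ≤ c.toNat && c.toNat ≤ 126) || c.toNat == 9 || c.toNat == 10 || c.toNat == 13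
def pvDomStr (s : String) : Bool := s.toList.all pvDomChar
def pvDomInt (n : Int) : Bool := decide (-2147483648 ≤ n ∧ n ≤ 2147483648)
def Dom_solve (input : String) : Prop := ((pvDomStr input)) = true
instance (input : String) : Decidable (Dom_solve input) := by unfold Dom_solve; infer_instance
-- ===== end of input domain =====

-- B replaces A's recursive `navigate` (enum directions, threaded mutable set, set-union
-- returns) by a worklist loop over integer direction codes 0..3 with delta/reflection lookup
-- tables, keeping the grid as raw strings; objective: faster (no set-union copies at splitters,
-- no recursion), measured faster in a timing run.
-- ===== PORT A =====

-- Direction enum values, as their (dy, dx) value pairs.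
def pvDirs : List (Int × Int) := [(-1, 0), (1, 0), (0, -1), (0, 1)]

def pvParse (input : String) : List (List Char) :=
  (PySem.Str.splitlines input).map (fun l => l.toList)

-- grid[y][x]; total form: only evaluated after the bounds check, and Pre_solve excludes
-- ragged grids, so the defaults are never the value read under Pre_.
def pvCell (grid : List (List Char)) (y x : Int) : Char :=
  PySem.List.pyGetD (PySem.List.pyGetD grid y []) x ' '

-- the '\' and '/' match-arms of A (and the fall-through for every other tile)
def pvReflectA (c : Char) (d : Int × Int) : Int × Int :=
  if c = '\\' then
    if d = (-1, 0) then (0, -1)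
    else if d = (1, 0) then (0, 1)
    else if d = (0, -1) then (-1, 0)
    else if d = (0, 1) then (1, 0)
    else d
  else if c = '/' then
    if d = (-1, 0) then (0, 1)
    else if d = (1, 0) then (0, -1)
    else if d = (0, -1) then (1, 0)
    else if d = (0, 1) then (-1, 0)
    else d
  else d

-- A's navigate: recursive, the visited set threaded through the calls.  The fuel parameter
-- and the `d ∉ pvDirs` disjunct are totality guards only: solve passes enough fuel for every
-- reachable call, and every direction that occurs is one of the four enum values.
def pvNavAF (grid : List (List Char)) (fuel : Nat) (start d : Int × Int)
    (visited : List ((Int × Int) × (Int × Int))) : List ((Int × Int) × (Int × Int)) :=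
  match fuel with
  | 0 => visited
  | fuel + 1 =>
    let y := start.1
    let x := start.2
    if (((y, x), d) ∈ visited) ∨ x < 0 ∨ y < 0 ∨
        ((grid.headD []).length : Int) ≤ x ∨ (grid.length : Int) ≤ y ∨ d ∉ pvDirs then
      visited
    else
      let c := pvCell grid y x
      if c = '|' ∧ (d = (0, -1) ∨ d = (0, 1)) then
        pvNavAF grid fuel (y + 1, x) (1, 0)
          (pvNavAF grid fuel (y - 1, x) (-1, 0) (PySem.Set.add visited ((y, x), d)))
      else if c = '-' ∧ (d = (-1, 0) ∨ d = (1, 0)) then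
        pvNavAF grid fuel (y, x + 1) (0, 1)
          (pvNavAF grid fuel (y, x - 1) (0, -1) (PySem.Set.add visited ((y, x), d)))
      else
        let d2 := pvReflectA c d
        pvNavAF grid fuel (y + d2.1, x + d2.2) d2 (PySem.Set.add visited ((y, x), d))

def pvCountA (v : List ((Int × Int) × (Int × Int))) : Int :=
  ((PySem.Set.ofList (v.map Prod.fst)).length : Int)

def solve (input : String) : Int × Int :=
  let grid := pvParse input
  let rows := (grid.length : Int)
  let cols := ((grid.headD []).length : Int)   -- len(grid[0]); Pre_solve gives grid ≠ []
  -- recursion fuel: one more than the number of valid (cell, direction) states; every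
  -- reachable recursive call of navigate has burnt at most that many (see pvNavAF_eq below)
  let fuel := 4 * grid.length * (grid.headD []).length + 1
  let part1 := pvCountA (pvNavAF grid fuel (0, 0) (0, 1) [])
  let m1 := (PySem.List.pyRange 0 cols 1).foldl (fun acc x =>
      max (max acc (pvCountA (pvNavAF grid fuel (0, x) (1, 0) [])))
        (pvCountA (pvNavAF grid fuel (rows - 1, x) (-1, 0) []))) 0
  let m2 := (PySem.List.pyRange 0 rows 1).foldl (fun acc y =>
      max (max acc (pvCountA (pvNavAF grid fuel (y, 0) (0, 1) [])))
        (pvCountA (pvNavAF grid fuel (y, cols - 1) (0, -1) []))) m1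
  (part1, m2)

-- ===== PORT B =====

-- direction codes: 0 = up, 1 = down, 2 = left, 3 = right; DELTAS[code] = (dy, dx)
def pvDeltas : List (Int × Int) := [(-1, 0), (1, 0), (0, -1), (0, 1)]

-- Source B's step(c, d): successor direction codes, reflections via lookup tables.  The pyGetD
-- defaults are totality guards only: codes that occur are always 0..3.
def pvStepB (c : Char) (d : Int) : List Int :=
  if c = '|' ∧ 2 ≤ d then [0, 1]
  else if c = '-' ∧ d < 2 then [2, 3]
  else if c = '\\' then [PySem.List.pyGetD [2, 3, 0, 1] d 0]
  else if c = '/' then [PySem.List.pyGetD [3, 2, 1, 0] d 0]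
  else [d]

-- Source B's worklist loop (todo is popped from the end of the python list; the head of this
-- list is that end; pushing reversed(step(..)) one by one = prepending step(..) in order).
-- The fuel (one unit per iteration) is a totality guard only: solve_alt passes enough fuel.
def pvRunB (grid : List String) (rows cols : Int) (fuel : Nat)
    (todo seen : List ((Int × Int) × Int)) : List ((Int × Int) × Int) :=
  match fuel, todo with
  | _, [] => seen
  | 0, _ :: _ => seen
  | fuel + 1, sd :: todo' =>
    let y := sd.1.1
    let x := sd.1.2
    let d := sd.2
    if (((y, x), d) ∈ seen) ∨ ¬(0 ≤ y ∧ y < rows ∧ 0 ≤ x ∧ x < cols) then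
      pvRunB grid rows cols fuel todo' seen
    else
      -- grid[y][x]: string indexing; in-bounds whenever this line is reached (Pre_solve)
      let c := (PySem.Str.pyGet? (PySem.List.pyGetD grid y "") x).getD ' '
      pvRunB grid rows cols fuel
        ((pvStepB c d).map (fun nd =>
          ((y + (PySem.List.pyGetD pvDeltas nd (0, 0)).1,
            x + (PySem.List.pyGetD pvDeltas nd (0, 0)).2), nd)) ++ todo')
        (PySem.Set.add seen ((y, x), d))

-- len({p for p, _ in seen})
def pvCountB (v : List ((Int × Int) × Int)) : Int :=
  ((PySem.Set.ofList (v.map Prod.fst)).length : Int)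

def solve_alt (input : String) : Int × Int :=
  let grid := PySem.Str.splitlines input
  let rows := (grid.length : Int)
  let cols := PySem.Str.len (grid.headD "")   -- len(grid[0]); Pre_solve gives grid ≠ []
  -- loop fuel (totality guard): every iteration pops one entry; at most
  -- 1 + 2·(number of valid states) pops occur in a run
  let fuel := 2 * (4 * grid.length * (grid.headD "").toList.length + 1) + 1
  let energized := fun (y x d : Int) => pvCountB (pvRunB grid rows cols fuel [((y, x), d)] [])
  let counts :=
    (PySem.List.pyRange 0 cols 1).map (fun x => energized 0 x 1) ++
    (PySem.List.pyRange 0 cols 1).map (fun x => energized (rows - 1) x 0) ++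
    (PySem.List.pyRange 0 rows 1).map (fun y => energized y 0 3) ++
    (PySem.List.pyRange 0 rows 1).map (fun y => energized y (cols - 1) 2)
  (energized 0 0 3, (PySem.List.max? counts (fun v => v)).getD 0)

-- ===== PRECONDITION & SPEC =====
-- Pre_solve excludes the empty input (len(grid[0]) raises IndexError in A) and ragged inputs
-- (lines of unequal length): on those A raises IndexError whenever a beam reaches a cell
-- missing from a short row, and where no beam does, A and B return the same value (see the
-- excluded example in the claim).
def Pre_solve (input : String) : Prop :=
  PySem.Str.splitlines input ≠ [] ∧
  ∀ l ∈ PySem.Str.splitlines input,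
    PySem.Str.len l = PySem.Str.len ((PySem.Str.splitlines input).headD "")
instance (input : String) : Decidable (Pre_solve input) := by unfold Pre_solve; infer_instance

def pvWitness_solve : String := ".\\\n|."

def Spec_solve (input : String) (out : Int × Int) : Prop := out = solve_alt input
instance (input : String) (out : Int × Int) : Decidable (Spec_solve input out) := by
  unfold Spec_solve; infer_instance

-- ===== CLAIM (what is proved, stated in full; the proofs are below) =====
def Claim_equal_solve : Prop :=
  ∀ (input : String), Dom_solve input → Pre_solve input → Spec_solve input (solve input)

-- ===== LEMMAS AND PROOFS =====

-- A's per-tile successor directions, written over (dy, dx) pairs (proof-side bridge)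
def pvNextsA (c : Char) (d : Int × Int) : List (Int × Int) :=
  if c = '|' ∧ (d = (0, -1) ∨ d = (0, 1)) then [(-1, 0), (1, 0)]
  else if c = '-' ∧ (d = (-1, 0) ∨ d = (1, 0)) then [(0, -1), (0, 1)]
  else if c = '\\' then [(d.2, d.1)]
  else if c = '/' then [(-d.2, -d.1)]
  else [d]

-- encoding of A-states into B-states: direction pair → code
def pvCode (d : Int × Int) : Int :=
  if d = (-1, 0) then 0 else if d = (1, 0) then 1
  else if d = (0, -1) then 2 else if d = (0, 1) then 3 else 4

def pvEnc (s : (Int × Int) × (Int × Int)) : (Int × Int) × Int := (s.1, pvCode s.2)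

-- termination measure for the proof-side loops: number of still-unvisited valid states
def pvValid (grid : List (List Char)) (s : (Int × Int) × (Int × Int)) : Bool :=
  decide (0 ≤ s.1.1 ∧ s.1.1 < (grid.length : Int) ∧ 0 ≤ s.1.2 ∧
          s.1.2 < ((grid.headD []).length : Int) ∧ s.2 ∈ pvDirs)

def pvKey (grid : List (List Char)) (v : List ((Int × Int) × (Int × Int))) : Nat :=
  (PySem.Set.ofList (v.filter (fun s => pvValid grid s))).length

def pvMes (grid : List (List Char)) (v : List ((Int × Int) × (Int × Int))) : Nat :=
  4 * grid.length * (grid.headD []).length + 1 - pvKey grid v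

def pvAll (grid : List (List Char)) : List ((Int × Int) × (Int × Int)) :=
  (PySem.List.pyRange 0 (grid.length : Int) 1).flatMap (fun y =>
    (PySem.List.pyRange 0 ((grid.headD []).length : Int) 1).flatMap (fun x =>
      pvDirs.map (fun dd => ((y, x), dd))))

lemma pvKey_le (grid : List (List Char)) (v : List ((Int × Int) × (Int × Int))) :
    pvKey grid v ≤ 4 * grid.length * (grid.headD []).length := by
  unfold pvKey
  have hn := PySem.Set.nodup_ofList (v.filter (fun s => pvValid grid s))
  have hsub : PySem.Set.ofList (v.filter (fun s => pvValid grid s)) ⊆ pvAll grid := by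
    intro a ha
    rw [PySem.Set.mem_ofList, List.mem_filter] at ha
    have hval := ha.2
    simp only [pvValid, decide_eq_true_eq] at hval
    obtain ⟨h1, h2, h3, h4, h5⟩ := hval
    simp only [pvAll, List.mem_flatMap, PySem.List.mem_pyRange_one, List.mem_map]
    exact ⟨a.1.1, ⟨h1, h2⟩, a.1.2, ⟨h3, h4⟩, a.2, h5, rfl⟩
  have hlen : (pvAll grid).length = 4 * grid.length * (grid.headD []).length := by
    simp [pvAll, List.length_flatMap, pvDirs,
      PySem.List.length_pyRange_one, List.map_const', List.sum_replicate, smul_eq_mul]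
    ring
  calc _ ≤ (pvAll grid).length := (List.subperm_of_subset hn hsub).length_le
    _ = _ := hlen

lemma pvKey_mono {grid : List (List Char)} {v w : List ((Int × Int) × (Int × Int))}
    (h : v ⊆ w) : pvKey grid v ≤ pvKey grid w := by
  unfold pvKey
  have hn := PySem.Set.nodup_ofList (v.filter (fun s => pvValid grid s))
  refine (List.subperm_of_subset hn ?_).length_le
  intro a ha
  rw [PySem.Set.mem_ofList] at ha ⊢
  rw [List.mem_filter] at ha ⊢
  exact ⟨h ha.1, ha.2⟩

lemma pvKey_add {grid : List (List Char)} {v : List ((Int × Int) × (Int × Int))}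
    {s : (Int × Int) × (Int × Int)} (hs : s ∉ v) (hv : pvValid grid s = true) :
    pvKey grid (PySem.Set.add v s) = pvKey grid v + 1 := by
  unfold pvKey
  rw [PySem.Set.add_of_not_mem hs, List.filter_append]
  have h1 : List.filter (fun s => pvValid grid s) [s] = [s] := by simp [hv]
  rw [h1, PySem.Set.ofList_append_singleton,
    PySem.Set.add_of_not_mem (by
      rw [PySem.Set.mem_ofList, List.mem_filter]; tauto),
    List.length_append]
  rfl

lemma pvMes_add_lt {grid : List (List Char)} {v : List ((Int × Int) × (Int × Int))}
    {s : (Int × Int) × (Int × Int)} (hs : s ∉ v) (hv : pvValid grid s = true) :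
    pvMes grid (PySem.Set.add v s) < pvMes grid v := by
  have h1 := pvKey_add (grid := grid) hs hv
  have h2 := pvKey_le grid v
  unfold pvMes; omega

-- visited only grows
lemma pvSubset_add {α : Type} [BEq α] [LawfulBEq α] (v : List α) (s : α) : v ⊆ PySem.Set.add v s := by
  rw [PySem.Set.add_eq_ite]
  split
  · exact List.Subset.refl _
  · exact List.subset_append_left _ _

lemma pvMes_mono {grid : List (List Char)} {v w : List ((Int × Int) × (Int × Int))}
    (h : v ⊆ w) : pvMes grid w ≤ pvMes grid v := by
  have := pvKey_mono (grid := grid) h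
  unfold pvMes; omega

-- the decrease fact both loops use: adding the popped state shrinks the measure
lemma pvNavW_dec (grid : List (List Char)) (s d : Int × Int)
    (v : List ((Int × Int) × (Int × Int)))
    (h : ¬((((s.1, s.2), d) ∈ v) ∨ s.2 < 0 ∨ s.1 < 0 ∨
      ((grid.headD []).length : Int) ≤ s.2 ∨ (grid.length : Int) ≤ s.1 ∨ d ∉ pvDirs)) :
    pvMes grid (PySem.Set.add v ((s.1, s.2), d)) < pvMes grid v := by
  push_neg at h
  exact pvMes_add_lt h.1 (by
    simp only [pvValid, decide_eq_true_eq]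
    exact ⟨by omega, by omega, by omega, by omega, h.2.2.2.2.2⟩)

lemma pvRunW_dec (grid : List (List Char)) (s d : Int × Int)
    (v : List ((Int × Int) × (Int × Int)))
    (h : ¬((((s.1, s.2), d) ∈ v) ∨ ¬(0 ≤ s.1 ∧ s.1 < (grid.length : Int) ∧ 0 ≤ s.2 ∧
      s.2 < ((grid.headD []).length : Int)) ∨ d ∉ pvDirs)) :
    pvMes grid (PySem.Set.add v ((s.1, s.2), d)) < pvMes grid v := by
  push_neg at h
  exact pvMes_add_lt h.1 (by
    simp only [pvValid, decide_eq_true_eq]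
    exact ⟨h.2.1.1, h.2.1.2.1, h.2.1.2.2.1, h.2.1.2.2.2, h.2.2⟩)

-- proof-side well-founded version of pvNavAF (no fuel; certifies that visited only grows)
def pvNavW (grid : List (List Char)) (start : Int × Int) (d : Int × Int)
    (visited : List ((Int × Int) × (Int × Int))) :
    {w : List ((Int × Int) × (Int × Int)) // visited ⊆ w} :=
  let y := start.1
  let x := start.2
  if h : (((y, x), d) ∈ visited) ∨ x < 0 ∨ y < 0 ∨
      ((grid.headD []).length : Int) ≤ x ∨ (grid.length : Int) ≤ y ∨ d ∉ pvDirs then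
    ⟨visited, List.Subset.refl _⟩
  else
    let c := pvCell grid y x
    if c = '|' ∧ (d = (0, -1) ∨ d = (0, 1)) then
      let r1 := pvNavW grid (y - 1, x) (-1, 0) (PySem.Set.add visited ((y, x), d))
      let r2 := pvNavW grid (y + 1, x) (1, 0) r1.val
      ⟨r2.val, List.Subset.trans (pvSubset_add visited ((y, x), d))
        (List.Subset.trans r1.property r2.property)⟩
    else if c = '-' ∧ (d = (-1, 0) ∨ d = (1, 0)) then
      let r1 := pvNavW grid (y, x - 1) (0, -1) (PySem.Set.add visited ((y, x), d))
      let r2 := pvNavW grid (y, x + 1) (0, 1) r1.val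
      ⟨r2.val, List.Subset.trans (pvSubset_add visited ((y, x), d))
        (List.Subset.trans r1.property r2.property)⟩
    else
      let d2 := pvReflectA c d
      let r := pvNavW grid (y + d2.1, x + d2.2) d2 (PySem.Set.add visited ((y, x), d))
      ⟨r.val, List.Subset.trans (pvSubset_add visited ((y, x), d)) r.property⟩
termination_by pvMes grid visited
decreasing_by
  all_goals first
  | exact Nat.lt_of_le_of_lt (pvMes_mono r1.property) (pvNavW_dec grid start d visited h)
  | exact pvNavW_dec grid start d visited h

-- proof-side DFS stack loop over A-states (no fuel); bridges pvNavW and pvRunB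
def pvRunW (grid : List (List Char)) (stack : List ((Int × Int) × (Int × Int)))
    (visited : List ((Int × Int) × (Int × Int))) : List ((Int × Int) × (Int × Int)) :=
  match stack with
  | [] => visited
  | sd :: rest =>
    let y := sd.1.1
    let x := sd.1.2
    let d := sd.2
    if h : (((y, x), d) ∈ visited) ∨ ¬ (0 ≤ y ∧ y < (grid.length : Int) ∧ 0 ≤ x ∧
        x < ((grid.headD []).length : Int)) ∨ d ∉ pvDirs then
      pvRunW grid rest visited
    else
      pvRunW grid ((pvNextsA (pvCell grid y x) d).map (fun nd => ((y + nd.1, x + nd.2), nd)) ++ rest)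
        (PySem.Set.add visited ((y, x), d))
termination_by (pvMes grid visited, stack.length)
decreasing_by
  · exact Prod.Lex.right _ (Nat.lt_succ_self _)
  · exact Prod.Lex.left _ _ (pvRunW_dec grid sd.1 sd.2 visited h)

-- fueled twin of pvRunW over A-states (same recursion pattern as the port pvRunB)
def pvRunS (grid : List (List Char)) (fuel : Nat)
    (stack visited : List ((Int × Int) × (Int × Int))) : List ((Int × Int) × (Int × Int)) :=
  match fuel, stack with
  | _, [] => visited
  | 0, _ :: _ => visited
  | fuel + 1, sd :: rest =>
    let y := sd.1.1
    let x := sd.1.2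
    let d := sd.2
    if (((y, x), d) ∈ visited) ∨ ¬(0 ≤ y ∧ y < (grid.length : Int) ∧ 0 ≤ x ∧
        x < ((grid.headD []).length : Int)) ∨ d ∉ pvDirs then
      pvRunS grid fuel rest visited
    else
      pvRunS grid fuel
        ((pvNextsA (pvCell grid y x) d).map (fun nd => ((y + nd.1, x + nd.2), nd)) ++ rest)
        (PySem.Set.add visited ((y, x), d))

lemma pvReflect_bs {d : Int × Int} (hd : d ∈ pvDirs) : pvReflectA '\\' d = (d.2, d.1) := by
  simp only [pvDirs, List.mem_cons, List.not_mem_nil, or_false] at hd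
  rcases hd with rfl | rfl | rfl | rfl <;> rfl

lemma pvReflect_fs {d : Int × Int} (hd : d ∈ pvDirs) : pvReflectA '/' d = (-d.2, -d.1) := by
  simp only [pvDirs, List.mem_cons, List.not_mem_nil, or_false] at hd
  rcases hd with rfl | rfl | rfl | rfl <;> rfl

lemma pvReflect_other {c : Char} (h1 : c ≠ '\\') (h2 : c ≠ '/') (d : Int × Int) :
    pvReflectA c d = d := by
  simp [pvReflectA, h1, h2]

-- the DFS stack loop, run on (s,d) :: rest, first computes A's navigate(s, d, visited)
lemma pvRunW_eq_navW (grid : List (List Char)) :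
    ∀ (n : Nat) (v : List ((Int × Int) × (Int × Int))), pvMes grid v ≤ n →
      ∀ (s d : Int × Int) (rest : List ((Int × Int) × (Int × Int))),
        pvRunW grid ((s, d) :: rest) v = pvRunW grid rest (pvNavW grid s d v).val := by
  intro n
  induction n with
  | zero =>
    intro v hv s d rest
    have := pvKey_le grid v
    unfold pvMes at hv
    omega
  | succ n ih =>
    intro v hv s d rest
    rw [pvRunW, pvNavW]
    dsimp only
    by_cases h1 : (((s.1, s.2), d) ∈ v) ∨ s.2 < 0 ∨ s.1 < 0 ∨
        ((grid.headD []).length : Int) ≤ s.2 ∨ (grid.length : Int) ≤ s.1 ∨ d ∉ pvDirs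
    · have h2 : (((s.1, s.2), d) ∈ v) ∨
          ¬(0 ≤ s.1 ∧ s.1 < (grid.length : Int) ∧ 0 ≤ s.2 ∧
            s.2 < ((grid.headD []).length : Int)) ∨ d ∉ pvDirs := by
        rcases h1 with h | h | h | h | h | h
        · exact Or.inl h
        · exact Or.inr (Or.inl (by omega))
        · exact Or.inr (Or.inl (by omega))
        · exact Or.inr (Or.inl (by omega))
        · exact Or.inr (Or.inl (by omega))
        · exact Or.inr (Or.inr h)
      rw [dif_pos h2, dif_pos h1]
    · push_neg at h1
      obtain ⟨hm, hx0, hy0, hxc, hyr, hd⟩ := h1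
      have h2 : ¬((((s.1, s.2), d) ∈ v) ∨
          ¬(0 ≤ s.1 ∧ s.1 < (grid.length : Int) ∧ 0 ≤ s.2 ∧
            s.2 < ((grid.headD []).length : Int)) ∨ d ∉ pvDirs) := by
        rintro (hB | hB | hB)
        · exact hm hB
        · exact hB ⟨by omega, by omega, by omega, by omega⟩
        · exact hB hd
      have h1' : ¬((((s.1, s.2), d) ∈ v) ∨ s.2 < 0 ∨ s.1 < 0 ∨
          ((grid.headD []).length : Int) ≤ s.2 ∨ (grid.length : Int) ≤ s.1 ∨ d ∉ pvDirs) := by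
        rintro (hB | hB | hB | hB | hB | hB)
        · exact hm hB
        · omega
        · omega
        · omega
        · omega
        · exact hB hd
      rw [dif_neg h2, dif_neg h1']
      have hadd : pvMes grid (PySem.Set.add v ((s.1, s.2), d)) ≤ n := by
        have hlt := pvMes_add_lt (grid := grid) hm (by
          simp only [pvValid, decide_eq_true_eq]
          exact ⟨by omega, by omega, by omega, by omega, hd⟩)
        omega
      unfold pvNextsA
      by_cases hc1 : pvCell grid s.1 s.2 = '|' ∧ (d = (0, -1) ∨ d = (0, 1))
      · rw [if_pos hc1, if_pos hc1]
        dsimp only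
        simp only [List.map_cons, List.map_nil, List.cons_append, List.nil_append,
          add_zero, ← sub_eq_add_neg]
        rw [ih _ hadd, ih _ (le_trans (pvMes_mono (pvNavW grid (s.1 - 1, s.2) (-1, 0)
          (PySem.Set.add v ((s.1, s.2), d))).property) hadd)]
      · rw [if_neg hc1, if_neg hc1]
        by_cases hc2 : pvCell grid s.1 s.2 = '-' ∧ (d = (-1, 0) ∨ d = (1, 0))
        · rw [if_pos hc2, if_pos hc2]
          dsimp only
          simp only [List.map_cons, List.map_nil, List.cons_append, List.nil_append,
            add_zero, ← sub_eq_add_neg]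
          rw [ih _ hadd, ih _ (le_trans (pvMes_mono (pvNavW grid (s.1, s.2 - 1) (0, -1)
            (PySem.Set.add v ((s.1, s.2), d))).property) hadd)]
        · rw [if_neg hc2, if_neg hc2]
          by_cases hbs : pvCell grid s.1 s.2 = '\\'
          · rw [if_pos hbs]
            dsimp only
            rw [hbs, pvReflect_bs hd]
            simp only [List.map_cons, List.map_nil, List.cons_append, List.nil_append]
            rw [ih _ hadd]
          · rw [if_neg hbs]
            by_cases hfs : pvCell grid s.1 s.2 = '/'
            · rw [if_pos hfs]
              dsimp only
              rw [hfs, pvReflect_fs hd]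
              simp only [List.map_cons, List.map_nil, List.cons_append, List.nil_append]
              rw [ih _ hadd]
            · rw [if_neg hfs]
              dsimp only
              rw [pvReflect_other hbs hfs]
              simp only [List.map_cons, List.map_nil, List.cons_append, List.nil_append]
              rw [ih _ hadd]

lemma pvMes_pos (grid : List (List Char)) (v : List ((Int × Int) × (Int × Int))) :
    1 ≤ pvMes grid v := by
  have := pvKey_le grid v
  unfold pvMes
  omega

lemma pvMes_nil (grid : List (List Char)) :
    pvMes grid [] = 4 * grid.length * (grid.headD []).length + 1 := by
  unfold pvMes pvKey
  simp

-- with enough fuel, the fueled port computes the well-founded navigate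
lemma pvNavAF_eq (grid : List (List Char)) : ∀ (n : Nat) (v : List ((Int × Int) × (Int × Int))),
    pvMes grid v ≤ n → ∀ (fuel : Nat) (s d : Int × Int), pvMes grid v ≤ fuel →
      pvNavAF grid fuel s d v = (pvNavW grid s d v).val := by
  intro n
  induction n with
  | zero =>
    intro v hv fuel s d hf
    have := pvMes_pos grid v
    omega
  | succ n ih =>
    intro v hv fuel s d hf
    have hp := pvMes_pos grid v
    obtain ⟨f, rfl⟩ : ∃ f, fuel = f + 1 := ⟨fuel - 1, by omega⟩
    rw [pvNavAF, pvNavW]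
    dsimp only
    by_cases h1 : (((s.1, s.2), d) ∈ v) ∨ s.2 < 0 ∨ s.1 < 0 ∨
        ((grid.headD []).length : Int) ≤ s.2 ∨ (grid.length : Int) ≤ s.1 ∨ d ∉ pvDirs
    · rw [if_pos h1, dif_pos h1]
    · rw [if_neg h1, dif_neg h1]
      have hlt := pvNavW_dec grid s d v h1
      have hadd : pvMes grid (PySem.Set.add v ((s.1, s.2), d)) ≤ n := by omega
      have haddf : pvMes grid (PySem.Set.add v ((s.1, s.2), d)) ≤ f := by omega
      by_cases hc1 : pvCell grid s.1 s.2 = '|' ∧ (d = (0, -1) ∨ d = (0, 1))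
      · rw [if_pos hc1, if_pos hc1]
        dsimp only
        rw [ih _ hadd f (s.1 - 1, s.2) (-1, 0) haddf]
        exact ih _ (le_trans (pvMes_mono (pvNavW grid (s.1 - 1, s.2) (-1, 0)
            (PySem.Set.add v ((s.1, s.2), d))).property) hadd) f (s.1 + 1, s.2) (1, 0)
          (le_trans (pvMes_mono (pvNavW grid (s.1 - 1, s.2) (-1, 0)
            (PySem.Set.add v ((s.1, s.2), d))).property) haddf)
      · rw [if_neg hc1, if_neg hc1]
        by_cases hc2 : pvCell grid s.1 s.2 = '-' ∧ (d = (-1, 0) ∨ d = (1, 0))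
        · rw [if_pos hc2, if_pos hc2]
          dsimp only
          rw [ih _ hadd f (s.1, s.2 - 1) (0, -1) haddf]
          exact ih _ (le_trans (pvMes_mono (pvNavW grid (s.1, s.2 - 1) (0, -1)
              (PySem.Set.add v ((s.1, s.2), d))).property) hadd) f (s.1, s.2 + 1) (0, 1)
            (le_trans (pvMes_mono (pvNavW grid (s.1, s.2 - 1) (0, -1)
              (PySem.Set.add v ((s.1, s.2), d))).property) haddf)
        · rw [if_neg hc2, if_neg hc2]
          dsimp only
          exact ih _ hadd f _ _ haddf

-- with enough fuel (one unit per pop), the fueled stack loop computes the well-founded loop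
lemma pvRunS_eq (grid : List (List Char)) : ∀ (fuel : Nat)
    (stack v : List ((Int × Int) × (Int × Int))),
    stack.length + 2 * pvMes grid v ≤ fuel → pvRunS grid fuel stack v = pvRunW grid stack v := by
  intro fuel
  induction fuel with
  | zero =>
    intro stack v h
    have := pvMes_pos grid v
    omega
  | succ f ih =>
    intro stack v h
    cases stack with
    | nil => rw [pvRunS, pvRunW]
    | cons sd rest =>
      rw [pvRunS, pvRunW]
      by_cases h1 : (((sd.1.1, sd.1.2), sd.2) ∈ v) ∨ ¬(0 ≤ sd.1.1 ∧
          sd.1.1 < (grid.length : Int) ∧ 0 ≤ sd.1.2 ∧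
          sd.1.2 < ((grid.headD []).length : Int)) ∨ sd.2 ∉ pvDirs
      · rw [if_pos h1, dif_pos h1]
        exact ih rest v (by simp only [List.length_cons] at h; omega)
      · rw [if_neg h1, dif_neg h1]
        have hlt := pvRunW_dec grid sd.1 sd.2 v h1
        refine ih _ _ ?_
        simp only [List.length_cons] at h
        simp only [List.length_append, List.length_map]
        unfold pvNextsA
        split_ifs <;> simp only [List.length_cons, List.length_nil] <;> omega

-- ===== the encoding layer: B's code-based loop simulates the A-state stack loop =====

lemma pvCode_mem {d : Int × Int} (hd : d ∈ pvDirs) :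
    PySem.List.pyGetD pvDeltas (pvCode d) (0, 0) = d := by
  simp only [pvDirs, List.mem_cons, List.not_mem_nil, or_false] at hd
  rcases hd with rfl | rfl | rfl | rfl <;> decide

lemma pvCode_inj {d e : Int × Int} (hd : d ∈ pvDirs) (he : e ∈ pvDirs)
    (h : pvCode d = pvCode e) : d = e := by
  simp only [pvDirs, List.mem_cons, List.not_mem_nil, or_false] at hd he
  rcases hd with rfl | rfl | rfl | rfl <;> rcases he with rfl | rfl | rfl | rfl <;>
    first | rfl | (exfalso; revert h; decide)

lemma pvNextsA_sub {c : Char} {d : Int × Int} (hd : d ∈ pvDirs) :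
    ∀ nd ∈ pvNextsA c d, nd ∈ pvDirs := by
  intro nd hnd
  unfold pvNextsA at hnd
  simp only [pvDirs, List.mem_cons, List.not_mem_nil, or_false] at hd ⊢
  split_ifs at hnd <;>
    simp only [List.mem_cons, List.not_mem_nil, or_false] at hnd <;>
    rcases hd with rfl | rfl | rfl | rfl <;> rcases hnd with rfl | rfl <;> simp

lemma pvStepB_eq (c : Char) {d : Int × Int} (hd : d ∈ pvDirs) :
    pvStepB c (pvCode d) = (pvNextsA c d).map pvCode := by
  simp only [pvDirs, List.mem_cons, List.not_mem_nil, or_false] at hd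
  rcases hd with rfl | rfl | rfl | rfl <;>
    · unfold pvStepB pvNextsA
      split_ifs <;> simp_all [pvCode] <;> decide

lemma pvEnc_mem {s : (Int × Int) × (Int × Int)} {v : List ((Int × Int) × (Int × Int))}
    (hs : s.2 ∈ pvDirs) (hv : ∀ t ∈ v, t.2 ∈ pvDirs) :
    pvEnc s ∈ v.map pvEnc ↔ s ∈ v := by
  constructor
  · intro h
    rw [List.mem_map] at h
    obtain ⟨t, htv, hte⟩ := h
    have h1 : t.1 = s.1 := congrArg (fun z => z.1) hte
    have h2 : pvCode t.2 = pvCode s.2 := congrArg (fun z => z.2) hte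
    have : t = s := Prod.ext h1 (pvCode_inj (hv t htv) hs h2)
    rwa [this] at htv
  · exact List.mem_map_of_mem

lemma pvEnc_add {s : (Int × Int) × (Int × Int)} {v : List ((Int × Int) × (Int × Int))}
    (hs : s.2 ∈ pvDirs) (hv : ∀ t ∈ v, t.2 ∈ pvDirs) :
    PySem.Set.add (v.map pvEnc) (pvEnc s) = (PySem.Set.add v s).map pvEnc := by
  by_cases h : s ∈ v
  · rw [PySem.Set.add_of_mem h, PySem.Set.add_of_mem ((pvEnc_mem hs hv).mpr h)]
  · rw [PySem.Set.add_of_not_mem h,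
      PySem.Set.add_of_not_mem (fun hc => h ((pvEnc_mem hs hv).mp hc)), List.map_append]
    rfl

-- cell read: B's string indexing = A's char-list indexing
lemma pvCellB_eq (gridS : List String) (y x : Int) :
    (PySem.Str.pyGet? (PySem.List.pyGetD gridS y "") x).getD ' ' =
      pvCell (gridS.map String.toList) y x := by
  have h1 : PySem.List.pyGetD (gridS.map String.toList) y [] =
      (PySem.List.pyGetD gridS y "").toList := by
    simpa using PySem.List.pyGetD_map String.toList gridS y ""
  rw [pvCell, h1, PySem.Str.pyGet?_eq]
  rfl

-- B's worklist over encoded states computes the A-state stack loop, state for state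
lemma pvRunB_eq_map (gridS : List String) : ∀ (fuel : Nat)
    (stack v : List ((Int × Int) × (Int × Int))),
    (∀ s ∈ stack, s.2 ∈ pvDirs) → (∀ s ∈ v, s.2 ∈ pvDirs) →
    pvRunB gridS ((gridS.map String.toList).length : Int)
        (((gridS.map String.toList).headD []).length : Int) fuel
        (stack.map pvEnc) (v.map pvEnc)
      = (pvRunS (gridS.map String.toList) fuel stack v).map pvEnc := by
  intro fuel
  induction fuel with
  | zero =>
    intro stack v _ _
    cases stack <;> rfl
  | succ f ih =>
    intro stack v hstack hv
    cases stack with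
    | nil => rfl
    | cons sd rest =>
      have hd : sd.2 ∈ pvDirs := hstack sd List.mem_cons_self
      have hrest : ∀ s ∈ rest, s.2 ∈ pvDirs := fun s hs => hstack s (List.mem_cons_of_mem _ hs)
      rw [List.map_cons, pvRunB, pvRunS]
      simp only [pvEnc]
      by_cases h1 : (((sd.1.1, sd.1.2), sd.2) ∈ v) ∨ ¬(0 ≤ sd.1.1 ∧
          sd.1.1 < ((gridS.map String.toList).length : Int) ∧ 0 ≤ sd.1.2 ∧
          sd.1.2 < (((gridS.map String.toList).headD []).length : Int))
      · have h1' : (((sd.1.1, sd.1.2), pvCode sd.2) ∈ v.map pvEnc) ∨ ¬(0 ≤ sd.1.1 ∧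
            sd.1.1 < ((gridS.map String.toList).length : Int) ∧ 0 ≤ sd.1.2 ∧
            sd.1.2 < (((gridS.map String.toList).headD []).length : Int)) := by
          rcases h1 with h | h
          · exact Or.inl ((pvEnc_mem (s := ((sd.1.1, sd.1.2), sd.2)) hd hv).mpr h)
          · exact Or.inr h
        have h1'' : (((sd.1.1, sd.1.2), sd.2) ∈ v) ∨ ¬(0 ≤ sd.1.1 ∧
            sd.1.1 < ((gridS.map String.toList).length : Int) ∧ 0 ≤ sd.1.2 ∧
            sd.1.2 < (((gridS.map String.toList).headD []).length : Int)) ∨ sd.2 ∉ pvDirs := by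
          rcases h1 with h | h
          · exact Or.inl h
          · exact Or.inr (Or.inl h)
        rw [if_pos h1', if_pos h1'']
        exact ih rest v hrest hv
      · push_neg at h1
        have h1' : ¬((((sd.1.1, sd.1.2), pvCode sd.2) ∈ v.map pvEnc) ∨ ¬(0 ≤ sd.1.1 ∧
            sd.1.1 < ((gridS.map String.toList).length : Int) ∧ 0 ≤ sd.1.2 ∧
            sd.1.2 < (((gridS.map String.toList).headD []).length : Int))) := by
          rintro (h | h)
          · exact h1.1 ((pvEnc_mem (s := ((sd.1.1, sd.1.2), sd.2)) hd hv).mp h)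
          · exact h h1.2
        have h1'' : ¬((((sd.1.1, sd.1.2), sd.2) ∈ v) ∨ ¬(0 ≤ sd.1.1 ∧
            sd.1.1 < ((gridS.map String.toList).length : Int) ∧ 0 ≤ sd.1.2 ∧
            sd.1.2 < (((gridS.map String.toList).headD []).length : Int)) ∨ sd.2 ∉ pvDirs) := by
          rintro (h | h | h)
          · exact h1.1 h
          · exact h h1.2
          · exact h hd
        rw [if_neg h1', if_neg h1'']
        have hcell := pvCellB_eq gridS sd.1.1 sd.1.2
        have hstack' : ((pvStepB ((PySem.Str.pyGet? (PySem.List.pyGetD gridS sd.1.1 "") sd.1.2).getD ' ')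
              (pvCode sd.2)).map (fun nd =>
                ((sd.1.1 + (PySem.List.pyGetD pvDeltas nd (0, 0)).1,
                  sd.1.2 + (PySem.List.pyGetD pvDeltas nd (0, 0)).2), nd)) ++ rest.map pvEnc)
            = (((pvNextsA (pvCell (gridS.map String.toList) sd.1.1 sd.1.2) sd.2).map
                (fun nd => ((sd.1.1 + nd.1, sd.1.2 + nd.2), nd)) ++ rest).map pvEnc) := by
          rw [hcell, pvStepB_eq _ hd, List.map_append, List.map_map, List.map_map]
          congr 1
          apply List.map_congr_left
          intro nd hnd
          have hnd' : nd ∈ pvDirs := pvNextsA_sub hd nd hnd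
          simp only [Function.comp_apply, pvEnc, pvCode_mem hnd']
        have hrw : (((sd.1.1, sd.1.2), pvCode sd.2) : (Int × Int) × Int) =
            pvEnc ((sd.1.1, sd.1.2), sd.2) := rfl
        rw [hstack', hrw, pvEnc_add (s := ((sd.1.1, sd.1.2), sd.2)) hd hv]
        exact ih _ _ (by
            intro s hs
            rcases List.mem_append.mp hs with h | h
            · obtain ⟨nd, hnd, rfl⟩ := List.mem_map.mp h
              exact pvNextsA_sub hd nd hnd
            · exact hrest s h)
          (by
            intro s hs
            rcases (PySem.Set.mem_add _ _ _).mp hs with h | h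
            · exact hv s h
            · subst h; exact hd)

-- one beam from start to finish, A side: navigate with the fuel solve passes
lemma pvBeamA (grid : List (List Char)) (s d : Int × Int) :
    pvNavAF grid (4 * grid.length * (grid.headD []).length + 1) s d [] =
      (pvNavW grid s d []).val :=
  pvNavAF_eq grid (pvMes grid []) [] le_rfl _ s d (le_of_eq (pvMes_nil grid))

-- one beam from start to finish, B side: worklist = encoded navigate visited set
lemma pvBeamB (gridS : List String) (y x : Int) {d : Int × Int} (hd : d ∈ pvDirs) :
    pvRunB gridS ((gridS.map String.toList).length : Int)
        (((gridS.map String.toList).headD []).length : Int)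
        (2 * (4 * (gridS.map String.toList).length *
          ((gridS.map String.toList).headD []).length + 1) + 1)
        [((y, x), pvCode d)] []
      = ((pvNavW (gridS.map String.toList) (y, x) d []).val).map pvEnc := by
  have h1 := pvRunB_eq_map gridS
    (2 * (4 * (gridS.map String.toList).length *
      ((gridS.map String.toList).headD []).length + 1) + 1)
    [((y, x), d)] []
    (by intro s hs; simp only [List.mem_singleton] at hs; subst hs; exact hd)
    (by intro s hs; simp at hs)
  simp only [List.map_cons, List.map_nil, pvEnc] at h1
  rw [h1, pvRunS_eq _ _ _ []
      (by simp only [List.length_cons, List.length_nil, pvMes_nil]; omega),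
    pvRunW_eq_navW _ (pvMes (gridS.map String.toList) []) [] le_rfl (y, x) d [], pvRunW]

-- counting ignores the direction component, which pvEnc preserves positionally
lemma pvCount_map (l : List ((Int × Int) × (Int × Int))) :
    pvCountB (l.map pvEnc) = pvCountA l := by
  unfold pvCountA pvCountB
  rw [List.map_map]
  rfl

lemma pvHeadD_toList (l : List String) :
    (l.map String.toList).headD [] = (l.headD "").toList := by
  cases l <;> rfl

lemma pvFoldl_max_comm (L : List Int) : ∀ (a c : Int),
    L.foldl max (max a c) = max (L.foldl max a) c := by
  induction L with
  | nil => intro a c; rfl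
  | cons x t iht =>
    intro a c
    simp only [List.foldl_cons]
    rw [max_right_comm a c x, iht]

-- A's per-index double max-update is the grouped running max of B
lemma pvFoldl_two_max (f g : Int → Int) (l : List Int) : ∀ (a : Int),
    l.foldl (fun acc x => max (max acc (f x)) (g x)) a = (l.map f ++ l.map g).foldl max a := by
  induction l with
  | nil => intro a; rfl
  | cons x t iht =>
    intro a
    simp only [List.foldl_cons, List.map_cons, List.cons_append]
    rw [iht, List.foldl_append, List.foldl_append, List.foldl_cons, pvFoldl_max_comm]

-- Python max of a nonempty list of nonnegatives = the running max from 0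
lemma pvMax_eq_foldl (L : List Int) (hne : L ≠ []) (hpos : ∀ a ∈ L, 0 ≤ a) :
    (PySem.List.max? L (fun v => v)).getD 0 = L.foldl max 0 := by
  cases L with
  | nil => exact absurd rfl hne
  | cons x t =>
    rw [PySem.List.max?_id_cons]
    have hx : max 0 x = x := max_eq_right (hpos x List.mem_cons_self)
    simp only [List.foldl_cons, hx, Option.getD_some]


-- the four edge-start families: B's coded beam count = A's navigate count
lemma pvStartD (gridS : List String) (y x : Int) :
    pvCountB (pvRunB gridS ((gridS.map String.toList).length : Int)
        (((gridS.map String.toList).headD []).length : Int)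
        (2 * (4 * (gridS.map String.toList).length *
          ((gridS.map String.toList).headD []).length + 1) + 1)
        [((y, x), 1)] [])
      = pvCountA (pvNavAF (gridS.map String.toList)
          (4 * (gridS.map String.toList).length *
            ((gridS.map String.toList).headD []).length + 1) (y, x) (1, 0) []) := by
  conv_lhs => rw [show (1 : Int) = pvCode (1, 0) by decide]
  rw [pvBeamB gridS y x (by decide), pvCount_map, pvBeamA]

lemma pvStartU (gridS : List String) (y x : Int) :
    pvCountB (pvRunB gridS ((gridS.map String.toList).length : Int)
        (((gridS.map String.toList).headD []).length : Int)
        (2 * (4 * (gridS.map String.toList).length *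
          ((gridS.map String.toList).headD []).length + 1) + 1)
        [((y, x), 0)] [])
      = pvCountA (pvNavAF (gridS.map String.toList)
          (4 * (gridS.map String.toList).length *
            ((gridS.map String.toList).headD []).length + 1) (y, x) (-1, 0) []) := by
  conv_lhs => rw [show (0 : Int) = pvCode (-1, 0) by decide]
  rw [pvBeamB gridS y x (by decide), pvCount_map, pvBeamA]

lemma pvStartR (gridS : List String) (y x : Int) :
    pvCountB (pvRunB gridS ((gridS.map String.toList).length : Int)
        (((gridS.map String.toList).headD []).length : Int)
        (2 * (4 * (gridS.map String.toList).length *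
          ((gridS.map String.toList).headD []).length + 1) + 1)
        [((y, x), 3)] [])
      = pvCountA (pvNavAF (gridS.map String.toList)
          (4 * (gridS.map String.toList).length *
            ((gridS.map String.toList).headD []).length + 1) (y, x) (0, 1) []) := by
  conv_lhs => rw [show (3 : Int) = pvCode (0, 1) by decide]
  rw [pvBeamB gridS y x (by decide), pvCount_map, pvBeamA]

lemma pvStartL (gridS : List String) (y x : Int) :
    pvCountB (pvRunB gridS ((gridS.map String.toList).length : Int)
        (((gridS.map String.toList).headD []).length : Int)
        (2 * (4 * (gridS.map String.toList).length *
          ((gridS.map String.toList).headD []).length + 1) + 1)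
        [((y, x), 2)] [])
      = pvCountA (pvNavAF (gridS.map String.toList)
          (4 * (gridS.map String.toList).length *
            ((gridS.map String.toList).headD []).length + 1) (y, x) (0, -1) []) := by
  conv_lhs => rw [show (2 : Int) = pvCode (0, -1) by decide]
  rw [pvBeamB gridS y x (by decide), pvCount_map, pvBeamA]

-- Python max of the four concatenated count families, as a running max from 0
lemma pvCountA_nonneg (v : List ((Int × Int) × (Int × Int))) : 0 ≤ pvCountA v :=
  Int.natCast_nonneg _

lemma pvMax4 (g1 g2 g3 g4 : Int -> List ((Int × Int) × (Int × Int)))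
    (r1 r2 : List Int) (hr2 : r2 ≠ []) :
    (PySem.List.max? (r1.map (fun x => pvCountA (g1 x)) ++
        r1.map (fun x => pvCountA (g2 x)) ++
        r2.map (fun x => pvCountA (g3 x)) ++ r2.map (fun x => pvCountA (g4 x)))
        (fun v => v)).getD 0
      = ((r1.map (fun x => pvCountA (g1 x)) ++ r1.map (fun x => pvCountA (g2 x))) ++
          (r2.map (fun x => pvCountA (g3 x)) ++ r2.map (fun x => pvCountA (g4 x)))).foldl
          max 0 := by
  rw [pvMax_eq_foldl _ ?hne ?hnn]
  case hne =>
    intro hnil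
    have h3 : r2.map (fun x => pvCountA (g3 x)) = [] :=
      (List.append_eq_nil_iff.mp (List.append_eq_nil_iff.mp hnil).1).2
    exact hr2 (List.map_eq_nil_iff.mp h3)
  case hnn =>
    intro a ha
    simp only [List.mem_append, List.mem_map] at ha
    rcases ha with ((h | h) | h) | h <;> obtain ⟨x, _, rfl⟩ := h <;>
      exact pvCountA_nonneg _
  simp [List.foldl_append, List.append_assoc]

-- ===== VERDICT (by name: the statement is the Claim_ definition above) =====
theorem solve_spec : Claim_equal_solve := by
  unfold Claim_equal_solve Spec_solve
  intro input _ hpre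
  obtain ⟨hne, _⟩ := hpre
  unfold solve solve_alt pvParse
  dsimp only
  -- align B's row/col/fuel expressions with the A-side grid
  have hlenmap : (PySem.Str.splitlines input).length =
      ((PySem.Str.splitlines input).map String.toList).length := (List.length_map String.toList).symm
  have hhead : ((PySem.Str.splitlines input).headD "").toList =
      ((PySem.Str.splitlines input).map String.toList).headD [] :=
    (pvHeadD_toList _).symm
  have hcols : PySem.Str.len ((PySem.Str.splitlines input).headD "") =
      ((((PySem.Str.splitlines input).map String.toList).headD []).length : Int) := by
    rw [PySem.Str.len_eq, hhead]
  simp only [Prod.mk.injEq]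
  constructor
  · -- part 1: start (0,0) heading right (code 3 = (0,1))
    rw [hlenmap, hcols]
    have := pvBeamB (PySem.Str.splitlines input) 0 0
      (d := ((0 : Int), (1 : Int))) (by decide)
    rw [show (3 : Int) = pvCode (0, 1) by decide, hhead] at *
    rw [this, pvCount_map, pvBeamA]
  · -- part 2
    have hS : 0 < (PySem.Str.splitlines input).length := List.length_pos_of_ne_nil hne
    have hflen : ((PySem.Str.splitlines input).headD "").toList.length =
        (((PySem.Str.splitlines input).map String.toList).headD []).length :=
      congrArg List.length hhead
    rw [pvFoldl_two_max, pvFoldl_two_max, ← List.foldl_append]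
    rw [hlenmap, hcols, hflen]
    simp only [pvStartD, pvStartU, pvStartR, pvStartL]
    rw [pvMax4 _ _ _ _ _ _
      (by
        intro hnil
        have hlen := congrArg List.length hnil
        rw [PySem.List.length_pyRange_one] at hlen
        simp only [List.length_nil, List.length_map, sub_zero, Int.toNat_natCast] at hlen
        omega)]
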